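-- pv_equiv track=rewrite | github.com/google-research/google-research | multi_resolution_rec/util.py | _process_item_list
-- ===== SOURCE A (Python) =====
-- def _process_item_list(item_list, maxseqlen):
--   """Processes item list.
--
--   This function does two main edits to the item_list.
--   1. It does zero padding (from left) to have a fixed maxseqlen size.
--   2. It excludes the last item id since the next item (label) associated with it
--   falls beyond the training set.
--
--   Example:
--     item_list = [(1, q1, t1), (2, q2, t2), (3, q3, t3), (4, q4, t4)]
--     If maxseqlen = 6, returns
--     x = [0, 0, 0, 1, 2, 3],
--     q = [0, 0, q1, q2, q3, q4],
--     t = [0, 0, t1, t2, t3, t4],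
--     y = [0, 0, 1, 2, 3, 4].
--     If maxseqlen = 3, returns
--     x = [1, 2, 3],
--     q= [q2, q3, q4]
--     t = [t2, t3, t4],
--     y = [2, 3, 4].
--   Args:
--     item_list: A list of (item id, query id) tuples.
--     maxseqlen: Max sequence length.
--   Returns:
--     x: A list of length `maxseqlen` as the new item sequence.
--     q: A list of length 'maxseqlen' as the new query sequence.
--     t: A list of length 'maxseqlen' as the new time sequence.
--     y: Positive next item for each position.
--   """
--   x = [0] * maxseqlen
--   q = [0] * maxseqlen
--   t = [0] * maxseqlen
--   y = [0] * maxseqlen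
--
--   nxt = item_list[-1]
--   idx = maxseqlen - 1
--   for i in reversed(item_list[:-1]):
--     x[idx] = i[0]
--     q[idx] = nxt[1]
--     t[idx] = nxt[2]
--     y[idx] = nxt[0]
--     nxt = i
--     idx -= 1
--     if idx == -1:
--       break
--   if idx >= 0:  # Meaning if the max_len isn't achieved in upper loop.
--     q[idx] = nxt[1]
--     t[idx] = nxt[2]
--     y[idx] = nxt[0]
--   return x, q, t, y
-- ===== SOURCE B (Python) =====
-- def _process_item_list(item_list, maxseqlen):
--   ids = [it[0] for it in item_list]
--   q_full = [it[1] for it in item_list]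
--   t_full = [it[2] for it in item_list]
--   x_full = [0] + ids[:-1]
--
--   def pad(s):
--     return [0] * (maxseqlen - len(s)) + s[max(0, len(s) - maxseqlen):]
--
--   return pad(x_full), pad(q_full), pad(t_full), pad(ids)
-- ===== Notes on version B (the rewrite author's own statement) =====
-- stated objective: simpler
-- what changed: Replaces A's single reverse pass with a nxt-pointer, descending write index and break/post-write bookkeeping by a forward decomposition: build the four full field lists (with a one-step shift for x) and apply one left-pad/truncate helper to each.
import Mathlib
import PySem

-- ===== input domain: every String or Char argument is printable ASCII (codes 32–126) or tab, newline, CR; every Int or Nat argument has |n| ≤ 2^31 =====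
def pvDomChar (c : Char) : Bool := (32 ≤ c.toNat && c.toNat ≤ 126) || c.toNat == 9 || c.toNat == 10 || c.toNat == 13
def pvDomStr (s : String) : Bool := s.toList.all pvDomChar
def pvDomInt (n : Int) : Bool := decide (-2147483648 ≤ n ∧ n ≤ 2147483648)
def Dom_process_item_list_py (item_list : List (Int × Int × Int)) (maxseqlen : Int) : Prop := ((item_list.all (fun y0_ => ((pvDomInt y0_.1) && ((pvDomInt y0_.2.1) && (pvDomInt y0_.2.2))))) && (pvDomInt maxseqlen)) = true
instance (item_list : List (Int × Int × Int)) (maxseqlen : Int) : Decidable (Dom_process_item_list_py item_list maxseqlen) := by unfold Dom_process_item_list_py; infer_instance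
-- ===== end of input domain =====

-- B replaces A's reverse pass with nxt-pointer tracking by a forward field extraction plus a left-pad/truncate helper (objective: simpler).

-- B replaces A's reverse pass with nxt-pointer tracking by a forward field extraction plus a left-pad/truncate helper (objective: simpler; equal cost).

-- ===== PORT A =====
-- Python list assignment xs[i] = v (negative index wraps); exact where the index is in range
-- (the out-of-range case raises IndexError in Python; those inputs are excluded by Pre_).
def pySet (xs : List Int) (i : Int) (v : Int) : List Int :=
  if i < 0 then xs.set (i + xs.length).toNat v else xs.set i.toNat v

def loopA (items : List (Int × Int × Int)) (x q t y : List Int)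
    (nxt : Int × Int × Int) (idx : Int) :
    List Int × List Int × List Int × List Int × (Int × Int × Int) × Int :=
  match items with
  | [] => (x, q, t, y, nxt, idx)
  | i :: rest =>
    let x := pySet x idx i.1
    let q := pySet q idx nxt.2.1
    let t := pySet t idx nxt.2.2
    let y := pySet y idx nxt.1
    let nxt := i
    let idx := idx - 1
    if idx = -1 then (x, q, t, y, nxt, idx) else loopA rest x q t y nxt idx


def process_item_list_py (item_list : List (Int × Int × Int)) (maxseqlen : Int) :
    List Int × List Int × List Int × List Int :=
  let x := List.replicate maxseqlen.toNat (0 : Int)   -- [0] * maxseqlen ([] for maxseqlen ≤ 0)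
  let q := List.replicate maxseqlen.toNat (0 : Int)
  let t := List.replicate maxseqlen.toNat (0 : Int)
  let y := List.replicate maxseqlen.toNat (0 : Int)
  match PySem.List.pyGet? item_list (-1) with       -- nxt = item_list[-1]; none = IndexError (outside Pre_)
  | none => ([], [], [], [])
  | some nxt =>
    let idx := maxseqlen - 1
    let (x, q, t, y, nxt, idx) :=
      loopA (PySem.List.slice item_list none (some (-1))).reverse x q t y nxt idx
    if 0 ≤ idx then
      (x, pySet q idx nxt.2.1, pySet t idx nxt.2.2, pySet y idx nxt.1)
    else
      (x, q, t, y)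

-- ===== PORT B =====
-- pad(s): [0]*(maxseqlen-len(s)) + s[max(0, len(s)-maxseqlen):]
def padB (maxseqlen : Int) (s : List Int) : List Int :=
  List.replicate (maxseqlen - s.length).toNat 0 ++ s.drop ((s.length : Int) - maxseqlen).toNat

def process_item_list_py_alt (item_list : List (Int × Int × Int)) (maxseqlen : Int) :
    List Int × List Int × List Int × List Int :=
  let ids := item_list.map (·.1)
  let q_full := item_list.map (·.2.1)
  let t_full := item_list.map (·.2.2)
  let x_full := 0 :: ids.dropLast                    -- [0] + ids[:-1]
  (padB maxseqlen x_full, padB maxseqlen q_full, padB maxseqlen t_full, padB maxseqlen ids)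

-- ===== PRECONDITION & SPEC =====
-- Pre_ excludes exactly the inputs on which A raises: the empty list (IndexError on item_list[-1])
-- and maxseqlen ≤ 0 with at least two items (IndexError assigning x[maxseqlen-1] on an empty buffer).
def Pre_process_item_list_py (item_list : List (Int × Int × Int)) (maxseqlen : Int) : Prop :=
  item_list ≠ [] ∧ (1 ≤ maxseqlen ∨ item_list.length = 1)
instance (item_list : List (Int × Int × Int)) (maxseqlen : Int) : Decidable (Pre_process_item_list_py item_list maxseqlen) := by unfold Pre_process_item_list_py; infer_instance

def pvWitness_process_item_list_py : (List (Int × Int × Int)) × Int := ([(1, 7, 8), (2, 9, 3)], 3)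

def Spec_process_item_list_py (item_list : List (Int × Int × Int)) (maxseqlen : Int) (out : List Int × List Int × List Int × List Int) : Prop := out = process_item_list_py_alt item_list maxseqlen
instance (item_list : List (Int × Int × Int)) (maxseqlen : Int) (out : List Int × List Int × List Int × List Int) : Decidable (Spec_process_item_list_py item_list maxseqlen out) := by unfold Spec_process_item_list_py; infer_instance

-- ===== CLAIM (what is proved, stated in full; the proofs are below) =====
def Claim_equal_process_item_list_py : Prop := ∀ (item_list : List (Int × Int × Int)) (maxseqlen : Int), Dom_process_item_list_py item_list maxseqlen → Pre_process_item_list_py item_list maxseqlen → Spec_process_item_list_py item_list maxseqlen (process_item_list_py item_list maxseqlen)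
-- ===== LEMMAS AND PROOFS =====

theorem set_last (xs : List Int) (a v : Int) : (xs ++ [a]).set xs.length v = xs ++ [v] := by
  induction xs with
  | nil => rfl
  | cons h t ih => simp [ih]

theorem pySet_pad (j : Nat) (tx : List Int) (v : Int) :
    pySet (List.replicate (j + 1) 0 ++ tx) (j : Int) v = List.replicate j 0 ++ v :: tx := by
  have hj : ¬ ((j : Int) < 0) := by omega
  have hlt : j < (List.replicate (j + 1) (0 : Int)).length := by simp
  rw [pySet, if_neg hj, Int.toNat_natCast, List.set_append_left j v hlt,
    List.replicate_succ' (n := j)]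
  have := set_last (List.replicate j (0 : Int)) 0 v
  simp only [List.length_replicate] at this
  rw [this, List.append_assoc]
  rfl

theorem loopA_spec (items : List (Int × Int × Int)) (nxt : Int × Int × Int) (j : Nat)
    (tx tq tt ty : List Int) :
    loopA items (List.replicate (j + 1) 0 ++ tx) (List.replicate (j + 1) 0 ++ tq)
      (List.replicate (j + 1) 0 ++ tt) (List.replicate (j + 1) 0 ++ ty) nxt (j : Int) =
    (List.replicate (j + 1 - min items.length (j + 1)) 0 ++ ((items.take (min items.length (j + 1))).map (·.1)).reverse ++ tx,
      List.replicate (j + 1 - min items.length (j + 1)) 0 ++ (((nxt :: items).take (min items.length (j + 1))).map (·.2.1)).reverse ++ tq,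
      List.replicate (j + 1 - min items.length (j + 1)) 0 ++ (((nxt :: items).take (min items.length (j + 1))).map (·.2.2)).reverse ++ tt,
      List.replicate (j + 1 - min items.length (j + 1)) 0 ++ (((nxt :: items).take (min items.length (j + 1))).map (·.1)).reverse ++ ty,
      (nxt :: items).getD (min items.length (j + 1)) nxt, (j : Int) - min items.length (j + 1)) := by
  induction items generalizing nxt j tx tq tt ty with
  | nil => simp [loopA]
  | cons i rest ih =>
    rw [loopA]
    simp only [pySet_pad]
    by_cases hj : j = 0
    · subst hj
      simp [loopA]
    · obtain ⟨j', rfl⟩ : ∃ j', j = j' + 1 := ⟨j - 1, by omega⟩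
      push_cast
      rw [if_neg (by push_cast; omega)]
      have hcast : ((j' : Int) + 1 - 1) = (j' : Int) := by omega
      rw [hcast, ih i j' _ _ _ _]
      have hk : min (i :: rest).length (j' + 1 + 1) = min rest.length (j' + 1) + 1 := by
        simp only [List.length_cons]; omega
      have hle : min rest.length (j' + 1) ≤ rest.length := by omega
      refine Prod.ext ?_ (Prod.ext ?_ (Prod.ext ?_ (Prod.ext ?_ (Prod.ext ?_ ?_))))
      · simp [hk, List.take_succ_cons]
      · simp [hk, List.take_succ_cons]
      · simp [hk, List.take_succ_cons]
      · simp [hk, List.take_succ_cons]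
      · simp only [hk]
        rw [List.getD_eq_getElem _ _ (by simp only [List.length_cons]; omega), List.getD_eq_getElem _ _ (by simp only [List.length_cons]; omega)]
        rfl
      · simp only [hk, List.length_cons]
        push_cast
        omega

theorem seg_rev {α β : Type} (xs : List α) (f : α → β) (k : Nat) :
    ((xs.reverse.take k).map f).reverse = (xs.drop (xs.length - k)).map f := by
  rw [List.take_reverse, List.map_reverse, List.reverse_reverse]

theorem rep_cons (k : Nat) (l : List Int) :
    List.replicate k (0:Int) ++ 0 :: l = List.replicate (k+1) 0 ++ l := by
  simp [List.replicate_succ']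


theorem ab_agree (item_list : List (Int × Int × Int)) (maxseqlen : Int)
    (hne : item_list ≠ []) (hp : 1 ≤ maxseqlen ∨ item_list.length = 1) :
    process_item_list_py item_list maxseqlen = process_item_list_py_alt item_list maxseqlen := by
  obtain ⟨ys, a, rfl⟩ : ∃ ys a, item_list = ys ++ [a] := by
    rcases List.eq_nil_or_concat' item_list with h | ⟨ys, a, h⟩
    · exact absurd h hne
    · exact ⟨ys, a, h⟩
  simp only [process_item_list_py, process_item_list_py_alt, PySem.List.pyGet?_neg_one,
    List.getLast?_concat, PySem.List.slice_to_neg_one, List.dropLast_concat]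
  by_cases hm : 1 ≤ maxseqlen
  · -- maxseqlen ≥ 1
    obtain ⟨m', hm'⟩ : ∃ m' : Nat, maxseqlen = (m' : Int) + 1 := ⟨(maxseqlen - 1).toNat, by omega⟩
    subst hm'
    have htn : ((m' : Int) + 1).toNat = m' + 1 := by omega
    have hidx : ((m' : Int) + 1) - 1 = ((m' : Nat) : Int) := by omega
    rw [htn, hidx]
    rw [show (List.replicate (m' + 1) (0:Int)) = List.replicate (m' + 1) 0 ++ ([] : List Int) by simp]
    rw [loopA_spec]
    simp only [List.append_nil, List.length_reverse]
    by_cases hnm : ys.length ≤ m'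
    · -- whole list fits: k = ys.length, final write happens
      have hmin : min ys.length (m' + 1) = ys.length := by omega
      rw [hmin, if_pos (by omega)]
      have hc : (m' : Int) - (ys.length : Int) = ((m' - ys.length : Nat) : Int) := by omega
      have hrep2 : m' + 1 - ys.length = (m' - ys.length) + 1 := by omega
      rw [hc, hrep2]
      rw [show a :: ys.reverse = (ys ++ [a]).reverse by simp]
      simp only [pySet_pad, seg_rev]
      rw [List.getD_eq_getElem _ _ (by simp)]
      rw [List.getElem_reverse]
      obtain ⟨z, zs, hz⟩ : ∃ z zs, ys ++ [a] = z :: zs := by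
        cases ys with
        | nil => exact ⟨a, [], rfl⟩
        | cons b bs => exact ⟨b, bs ++ [a], rfl⟩
      have hlen : zs.length = ys.length := by
        have := congrArg List.length hz
        simp at this
        omega
      have d0 : ys.length + 1 - 1 - ys.length = 0 := by omega
      have d1 : ys.length + 1 - ys.length = 1 := by omega
      have t1 : ((m' : Int) + 1 - ((ys.length : Nat) + 1 : Int)).toNat = m' - ys.length := by omega
      have t2 : (((ys.length : Nat) + 1 : Int) - ((m' : Int) + 1)).toNat = 0 := by omega
      simp only [hz, padB, List.length_cons, List.length_map, List.length_dropLast, hlen,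
        List.map_cons, List.dropLast_cons_of_ne_nil, d0, d1, List.getElem_cons_zero,
        List.drop_succ_cons, List.drop_zero, Nat.sub_self, List.drop_one, List.tail_cons]
      push_cast [t1, t2]
      have hxd : (z.1 :: (zs.map (fun x => x.1))).dropLast = ys.map (fun x => x.1) := by
        rw [← List.map_cons, ← hz]
        simp
      simp [hxd, rep_cons]
    · -- truncation: k = m' + 1, no final write
      have hmin : min ys.length (m' + 1) = m' + 1 := by omega
      rw [hmin]
      push_cast
      rw [if_neg (by push_cast; omega)]
      rw [show a :: ys.reverse = (ys ++ [a]).reverse by simp]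
      simp only [seg_rev]
      have u1 : ((m' : Int) + 1 - ((ys.length : Nat) + 1 : Int)).toNat = 0 := by omega
      have u2 : (((ys.length : Nat) + 1 : Int) - ((m' : Int) + 1)).toNat = ys.length - m' := by omega
      have hk : ys.length - m' = (ys.length - (m' + 1)) + 1 := by omega
      have hk2 : ys.length + 1 - (m' + 1) = ys.length - m' := by omega
      simp only [padB, List.length_cons, List.length_map, List.length_dropLast,
        List.length_append, List.length_singleton, Nat.sub_self, List.replicate_zero,
        List.nil_append, u1, u2, hk2, hk, List.drop_succ_cons]
      push_cast [u1, u2]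
      simp [← List.map_drop, ← hk, show m' - ys.length = 0 from by omega, List.map_drop]
      rw [hk, List.drop_succ_cons]
  · -- maxseqlen ≤ 0, so item_list = [a]
    have hys : ys = [] := by
      rcases hp with h | h
      · omega
      · simpa using h
    subst hys
    have h0 : maxseqlen.toNat = 0 := by omega
    simp only [List.nil_append, List.reverse_nil, loopA, h0, List.replicate_zero]
    rw [if_neg (by omega)]
    simp only [padB]
    have h1 : (maxseqlen - 1).toNat = 0 := by omega
    have h2 : ((1 : Int) - maxseqlen).toNat = 1 - maxseqlen := by omega
    have h3 : ((1 : Int) - maxseqlen).toNat = 1 + (0 - maxseqlen).toNat := by omega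
    simp [h1, h3]

-- ===== VERDICT (by name: the statement is the Claim_ definition above) =====
theorem process_item_list_py_spec : Claim_equal_process_item_list_py := by
  intro item_list maxseqlen _ hpre
  unfold Spec_process_item_list_py
  exact ab_agree item_list maxseqlen hpre.1 hpre.2
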